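-- pv_equiv track=rewrite | github.com/Nechaevmichael/Stepik | Task345.py | shift_letter
-- ===== SOURCE A (Python) =====
-- def shift_letter(letter: str, shift: int) -> str:
--     'Функция сдвигает символ letter на shift позиций'
--     position = ord(letter) + shift
--     if position > 96 and position < 123:
--         return chr(position)
--     elif position < 97:
--         while position < 97:
--             position += 26
--         return chr(position)
--     elif position > 122:
--         while position > 122:
--             position -= 26
--         return chr(position)
-- ===== SOURCE B (Python) =====
-- def shift_letter(letter: str, shift: int) -> str:
--     'Функция сдвигает символ letter на shift позиций'
--     return chr((ord(letter) - 97 + shift) % 26 + 97)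
-- ===== Notes on version B (the rewrite author's own statement) =====
-- stated objective: faster
-- what changed: Replaced A's three-branch structure with two while-loops that repeatedly add/subtract 26 by a single closed-form modulo expression chr((ord(letter)-97+shift)%26+97).
import Mathlib
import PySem

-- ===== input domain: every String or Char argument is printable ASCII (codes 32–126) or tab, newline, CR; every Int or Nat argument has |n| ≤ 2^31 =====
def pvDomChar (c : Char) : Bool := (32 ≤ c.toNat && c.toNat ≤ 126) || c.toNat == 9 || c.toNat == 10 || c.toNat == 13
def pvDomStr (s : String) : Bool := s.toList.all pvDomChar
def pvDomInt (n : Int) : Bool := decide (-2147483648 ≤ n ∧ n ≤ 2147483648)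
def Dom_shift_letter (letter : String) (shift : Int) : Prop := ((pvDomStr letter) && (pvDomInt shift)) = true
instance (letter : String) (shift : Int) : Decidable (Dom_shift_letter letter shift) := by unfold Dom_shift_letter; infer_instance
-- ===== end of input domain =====

-- B replaces A's branch-and-loop wraparound by the closed form chr((ord(letter)-97+shift)%26+97); O(1) instead of O(|shift|).


-- ===== PORT A =====
-- while position < 97: position += 26
def shiftUp (position : Int) : Int :=
  if h : position < 97 then shiftUp (position + 26) else position
termination_by (97 - position).toNat
decreasing_by omega

-- while position > 122: position -= 26
def shiftDown (position : Int) : Int :=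
  if h : position > 122 then shiftDown (position - 26) else position
termination_by (position - 122).toNat
decreasing_by omega

def shift_letter (letter : String) (shift : Int) : String :=
  match letter.toList with
  | [c] =>
    let position : Int := (c.toNat : Int) + shift
    if 96 < position ∧ position < 123 then String.ofList [Char.ofNat position.toNat]
    else if position < 97 then String.ofList [Char.ofNat (shiftUp position).toNat]
    else String.ofList [Char.ofNat (shiftDown position).toNat]
  | _ => ""   -- ord(letter) raises TypeError: outside Pre_

-- ===== PORT B =====
def shift_letter_alt (letter : String) (shift : Int) : String :=
  if letter.toList.length = 1 then
    let c := letter.toList.headI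
    String.ofList [Char.ofNat (PySem.Int.mod ((c.toNat : Int) - 97 + shift) 26 + 97).toNat]
  else ""   -- ord(letter) raises TypeError: outside Pre_

-- ===== PRECONDITION & SPEC =====
-- Pre_ excludes only strings of length ≠ 1, on which Python's ord() raises TypeError.
def Pre_shift_letter (letter : String) (shift : Int) : Prop := letter.toList.length = 1
instance (letter : String) (shift : Int) : Decidable (Pre_shift_letter letter shift) := by unfold Pre_shift_letter; infer_instance
def pvWitness_shift_letter : String × Int := ("a", 3)
def Spec_shift_letter (letter : String) (shift : Int) (out : String) : Prop := out = shift_letter_alt letter shift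
instance (letter : String) (shift : Int) (out : String) : Decidable (Spec_shift_letter letter shift out) := by unfold Spec_shift_letter; infer_instance

-- ===== CLAIM (what is proved, stated in full; the proofs are below) =====
def Claim_equal_shift_letter : Prop := ∀ (letter : String) (shift : Int), Dom_shift_letter letter shift → Pre_shift_letter letter shift → Spec_shift_letter letter shift (shift_letter letter shift)

-- ===== LEMMAS AND PROOFS =====
theorem shiftUp_eq (p : Int) (h : p < 123) : shiftUp p = (p - 97) % 26 + 97 := by
  unfold shiftUp
  split
  · have h2 := shiftUp_eq (p + 26) (by omega)
    have h3 : p + 26 - 97 = p - 97 + 26 * 1 := by ring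
    rw [h2, h3, Int.add_mul_emod_self_left]
  · rw [Int.emod_eq_of_lt (by omega) (by omega)]; omega
termination_by (97 - p).toNat
decreasing_by omega

theorem shiftDown_eq (p : Int) (h : 96 < p) : shiftDown p = (p - 97) % 26 + 97 := by
  unfold shiftDown
  split
  · have h2 := shiftDown_eq (p - 26) (by omega)
    have h3 : p - 26 - 97 = p - 97 + 26 * (-1) := by ring
    rw [h2, h3, Int.add_mul_emod_self_left]
  · rw [Int.emod_eq_of_lt (by omega) (by omega)]; omega
termination_by (p - 122).toNat
decreasing_by omega

-- ===== VERDICT (by name: the statement is the Claim_ definition above) =====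
theorem shift_letter_spec : Claim_equal_shift_letter := by
  intro letter shift _ hpre
  unfold Spec_shift_letter shift_letter shift_letter_alt
  unfold Pre_shift_letter at hpre
  match hxs : letter.toList with
  | [] => simp [hxs] at hpre
  | c :: d :: rest => simp [hxs] at hpre
  | [c] =>
    simp only [List.length_cons, List.length_nil, List.headI, if_true]
    have hmod : PySem.Int.mod ((c.toNat : Int) - 97 + shift) 26
        = ((c.toNat : Int) - 97 + shift) % 26 :=
      PySem.Int.mod_eq_emod_of_pos (by omega)
    rw [hmod]
    set p : Int := (c.toNat : Int) + shift with hp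
    have harg : (c.toNat : Int) - 97 + shift = p - 97 := by omega
    rw [harg]
    split
    · rename_i hin
      have h1 : (p - 97) % 26 = p - 97 := Int.emod_eq_of_lt (by omega) (by omega)
      have h2 : p - 97 + 97 = p := by ring
      rw [h1, h2]
    · rename_i hnot
      split
      · rename_i hlt
        rw [shiftUp_eq p (by omega)]
      · rename_i hge
        rw [shiftDown_eq p (by omega)]
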